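-- pv_equiv track=rewrite | github.com/rossetv/mediaman | src/mediaman/web/routes/settings.py | _touches_sensitive_keys
-- ===== SOURCE A (Python) =====
-- _SECRET_PLACEHOLDER = "****"
--
-- SECRET_FIELDS = {
--     "plex_token",
--     "sonarr_api_key",
--     "radarr_api_key",
--     "nzbget_password",
--     "mailgun_api_key",
--     "tmdb_api_key",
--     "tmdb_read_token",
--     "openai_api_key",
--     "omdb_api_key",
-- }
--
-- SENSITIVE_KEYS = {
--     "plex_url",
--     "plex_public_url",
--     "sonarr_url",
--     "sonarr_public_url",
--     "radarr_url",
--     "radarr_public_url",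
--     "nzbget_url",
--     "nzbget_public_url",
--     "nzbget_username",
--     "mailgun_domain",
--     "mailgun_from_address",
--     "base_url",
-- } | SECRET_FIELDS
--
-- def _touches_sensitive_keys(body: dict) -> bool:
--     """Return True when *body* attempts to write any sensitive key.
--
--     Secret fields whose value is the unchanged sentinel (``****``) or an
--     empty string are skipped because the PUT handler ignores them too —
--     a no-op write should not demand a fresh reauth. The explicit
--     :data:`_SECRET_CLEAR_SENTINEL` is NOT skipped: deleting a stored
--     credential is a sensitive change.
--     """
--     for key, value in body.items():
--         if key not in SENSITIVE_KEYS: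
--             continue
--         if key in SECRET_FIELDS and (value == _SECRET_PLACEHOLDER or value == ""):
--             continue
--         if value is None:
--             continue
--         return True
--     return False
-- ===== SOURCE B (Python) =====
-- # B: instead of scanning body.items(), probe the fixed SENSITIVE_KEYS set and
-- # test each present value with a named predicate (same boolean for every dict).
-- _SECRET_PLACEHOLDER = "****"
--
-- SECRET_FIELDS = {
--     "plex_token",
--     "sonarr_api_key",
--     "radarr_api_key",
--     "nzbget_password",
--     "mailgun_api_key",
--     "tmdb_api_key",
--     "tmdb_read_token",
--     "openai_api_key",
--     "omdb_api_key",
-- }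
--
-- SENSITIVE_KEYS = {
--     "plex_url",
--     "plex_public_url",
--     "sonarr_url",
--     "sonarr_public_url",
--     "radarr_url",
--     "radarr_public_url",
--     "nzbget_url",
--     "nzbget_public_url",
--     "nzbget_username",
--     "mailgun_domain",
--     "mailgun_from_address",
--     "base_url",
-- } | SECRET_FIELDS
--
--
-- def _counts(key, value):
--     """True when writing *value* under *key* is a real sensitive change."""
--     if key in SECRET_FIELDS and (value == _SECRET_PLACEHOLDER or value == ""):
--         return False
--     return value is not None
--
--
-- def _touches_sensitive_keys(body: dict) -> bool:
--     return any(_counts(key, body[key]) for key in SENSITIVE_KEYS if key in body)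
-- ===== Notes on version B (the rewrite author's own statement) =====
-- stated objective: alternative
-- what changed: B inverts the traversal: instead of scanning every item of body and filtering, it probes the fixed SENSITIVE_KEYS set, looks each present key up in the dict, and applies a named _counts predicate via any().
import Mathlib
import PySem

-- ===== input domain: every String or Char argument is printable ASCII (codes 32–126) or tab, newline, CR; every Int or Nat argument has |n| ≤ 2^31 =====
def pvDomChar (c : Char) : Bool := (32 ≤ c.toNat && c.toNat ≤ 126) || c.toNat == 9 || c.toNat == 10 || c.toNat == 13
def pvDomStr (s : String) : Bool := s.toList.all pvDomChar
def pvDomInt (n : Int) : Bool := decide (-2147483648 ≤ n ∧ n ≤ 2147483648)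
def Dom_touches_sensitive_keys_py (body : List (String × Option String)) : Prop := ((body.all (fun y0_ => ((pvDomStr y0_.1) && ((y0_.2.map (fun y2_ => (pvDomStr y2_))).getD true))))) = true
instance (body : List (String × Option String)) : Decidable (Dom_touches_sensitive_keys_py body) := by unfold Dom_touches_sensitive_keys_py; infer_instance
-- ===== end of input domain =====

-- B inverts the traversal: it probes the fixed SENSITIVE_KEYS set and looks each
-- present key up in the dict, instead of scanning body.items() (objective: alternative).

-- ===== PORT A =====
def secretFields : List String :=
  ["plex_token", "sonarr_api_key", "radarr_api_key", "nzbget_password",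
   "mailgun_api_key", "tmdb_api_key", "tmdb_read_token", "openai_api_key",
   "omdb_api_key"]

def sensitiveKeys : List String :=
  ["plex_url", "plex_public_url", "sonarr_url", "sonarr_public_url",
   "radarr_url", "radarr_public_url", "nzbget_url", "nzbget_public_url",
   "nzbget_username", "mailgun_domain", "mailgun_from_address", "base_url"]
  ++ secretFields

-- the for-loop over body.items() with its three 'continue's and early return
def touches_sensitive_keys_py (body : List (String × Option String)) : Bool :=
  match body with
  | [] => false
  | (key, value) :: rest =>
    if !(sensitiveKeys.contains key) then touches_sensitive_keys_py rest
    else if secretFields.contains key && (value == some "****" || value == some "") then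
      touches_sensitive_keys_py rest
    else if value == none then touches_sensitive_keys_py rest
    else true

-- ===== PORT B =====
-- _counts predicate of Source B
def countsB (key : String) (value : Option String) : Bool :=
  if secretFields.contains key && (value == some "****" || value == some "") then false
  else value != none

-- any(_counts(key, body[key]) for key in SENSITIVE_KEYS if key in body)
def touches_sensitive_keys_py_alt (body : List (String × Option String)) : Bool :=
  sensitiveKeys.any (fun key =>
    match body.lookup key with
    | some value => countsB key value
    | none => false)

-- ===== PRECONDITION & SPEC =====
-- Pre_ excludes lists with duplicate keys: they are not a faithful encoding of a
-- Python dict (a dict cannot hold a key twice), so which entry counts is ambiguous.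
def Pre_touches_sensitive_keys_py (body : List (String × Option String)) : Prop :=
  (body.map Prod.fst).Nodup

instance (body : List (String × Option String)) : Decidable (Pre_touches_sensitive_keys_py body) := by
  unfold Pre_touches_sensitive_keys_py; infer_instance

def pvWitness_touches_sensitive_keys_py : (List (String × Option String)) :=
  [("plex_token", some "****"), ("base_url", some "http://x"), ("foo", none)]

def Spec_touches_sensitive_keys_py (body : List (String × Option String)) (out : Bool) : Prop := out = touches_sensitive_keys_py_alt body
instance (body : List (String × Option String)) (out : Bool) : Decidable (Spec_touches_sensitive_keys_py body out) := by unfold Spec_touches_sensitive_keys_py; infer_instance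

-- ===== CLAIM (what is proved, stated in full; the proofs are below) =====
def Claim_equal_touches_sensitive_keys_py : Prop := ∀ (body : List (String × Option String)), Dom_touches_sensitive_keys_py body → Pre_touches_sensitive_keys_py body → Spec_touches_sensitive_keys_py body (touches_sensitive_keys_py body)

-- ===== LEMMAS AND PROOFS =====

-- A's loop is `any` of (sensitive ∧ counts) over the items
lemma touchesA_eq_any (body : List (String × Option String)) :
    touches_sensitive_keys_py body
      = body.any (fun kv => sensitiveKeys.contains kv.1 && countsB kv.1 kv.2) := by
  induction body with
  | nil => rfl
  | cons kv rest ih =>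
    obtain ⟨key, value⟩ := kv
    rw [touches_sensitive_keys_py, List.any_cons, ih]
    simp only [countsB]
    by_cases h1 : key ∈ sensitiveKeys <;>
      by_cases h2 : key ∈ secretFields <;>
      by_cases h3 : value = some "****" <;>
      by_cases h4 : value = some "" <;>
      by_cases h5 : value = none <;>
      simp_all

-- first-match lookup agrees with membership when keys are unique
lemma lookup_eq_some_iff_mem {key : String} {value : Option String}
    (body : List (String × Option String))
    (h : (body.map Prod.fst).Nodup) :
    body.lookup key = some value ↔ (key, value) ∈ body := by
  induction body with
  | nil => simp [List.lookup]
  | cons kv rest ih =>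
    obtain ⟨k, v⟩ := kv
    simp only [List.map_cons, List.nodup_cons] at h
    by_cases hk : key = k
    · subst hk
      simp only [List.lookup, beq_self_eq_true, List.mem_cons]
      constructor
      · rintro h'
        simp only [Option.some.injEq] at h'
        exact Or.inl (by simp [h'])
      · rintro (h' | h')
        · simp only [Prod.mk.injEq] at h'
          simp [h'.2]
        · exact absurd (List.mem_map_of_mem h') h.1
    · have hkb : (key == k) = false := by simpa using hk
      simp [List.lookup, hkb, ih h.2, Prod.ext_iff, hk]

-- ===== VERDICT (by name: the statement is the Claim_ definition above) =====
theorem touches_sensitive_keys_py_spec : Claim_equal_touches_sensitive_keys_py := by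
  intro body _ hpre
  unfold Spec_touches_sensitive_keys_py
  rw [touchesA_eq_any, touches_sensitive_keys_py_alt]
  rw [Bool.eq_iff_iff]
  simp only [List.any_eq_true]
  constructor
  · rintro ⟨⟨key, value⟩, hmem, hP⟩
    simp only [Bool.and_eq_true] at hP
    refine ⟨key, ?_, ?_⟩
    · simpa using hP.1
    · rw [(lookup_eq_some_iff_mem body hpre).mpr hmem]
      exact hP.2
  · rintro ⟨key, hks, hP⟩
    cases hl : body.lookup key with
    | none => rw [hl] at hP; exact absurd hP (by simp)
    | some value =>
      rw [hl] at hP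
      refine ⟨(key, value), (lookup_eq_some_iff_mem body hpre).mp hl, ?_⟩
      simp only [Bool.and_eq_true]
      exact ⟨by simpa using hks, hP⟩
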